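-- pv_equiv track=rewrite | github.com/nmadev/MPES_ML | representation/regression_graphs.py | split_arr
-- ===== SOURCE A (Python) =====
-- def split_arr(arr):
--     new_arr = [[], [], []]
--     split_ranges = [(0, 12), (13, 80), (81, 93)]
--     for i in range(len(arr)):
--         for j in range(len(split_ranges)):
--             if i >= split_ranges[j][0] and i <= split_ranges[j][1]:
--                 new_arr[j].append(arr[i])
--     return new_arr
-- ===== SOURCE B (Python) =====
-- def split_arr(arr):
--     return [list(arr[0:13]), list(arr[13:81]), list(arr[81:94])]
-- ===== Notes on version B (the rewrite author's own statement) =====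
-- stated objective: simpler
-- what changed: Replaces the nested index loop with range-membership tests by three direct closed-form slices at the fixed boundaries 13/81/94.
import Mathlib
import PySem

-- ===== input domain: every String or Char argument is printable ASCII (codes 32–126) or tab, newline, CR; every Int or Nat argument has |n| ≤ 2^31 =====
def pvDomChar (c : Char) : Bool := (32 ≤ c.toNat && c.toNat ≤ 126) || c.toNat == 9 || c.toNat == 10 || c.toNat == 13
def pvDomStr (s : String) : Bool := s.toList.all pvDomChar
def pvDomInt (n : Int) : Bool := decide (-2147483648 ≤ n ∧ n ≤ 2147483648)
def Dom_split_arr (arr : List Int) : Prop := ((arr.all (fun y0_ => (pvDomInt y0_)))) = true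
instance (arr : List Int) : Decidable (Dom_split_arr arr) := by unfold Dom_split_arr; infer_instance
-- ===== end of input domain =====

-- B replaces A's nested index loop (range-membership test per element) by three direct slices; simpler.


-- ===== PORT A =====
-- literal port of A: for i in range(len(arr)): for j over the three ranges: if in range, append arr[i] to bucket j
def split_arr (arr : List Int) : List (List Int) :=
  let splitRanges : List (Int × Int) := [(0, 12), (13, 80), (81, 93)]
  (List.range arr.length).foldl
    (fun newArr (i : Nat) =>
      splitRanges.zipIdx.foldl
        (fun newArr rj =>
          if rj.1.1 ≤ (i : Int) ∧ (i : Int) ≤ rj.1.2 then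
            newArr.modify rj.2 (fun b => b ++ [arr.getD i 0])
          else newArr)
        newArr)
    [[], [], []]

-- ===== PORT B =====
def split_arr_alt (arr : List Int) : List (List Int) :=
  [PySem.List.slice arr (some 0) (some 13),
   PySem.List.slice arr (some 13) (some 81),
   PySem.List.slice arr (some 81) (some 94)]

-- ===== PRECONDITION & SPEC =====
def Spec_split_arr (arr : List Int) (out : List (List Int)) : Prop := out = split_arr_alt arr
instance (arr : List Int) (out : List (List Int)) : Decidable (Spec_split_arr arr out) := by unfold Spec_split_arr; infer_instance

-- ===== CLAIM (what is proved, stated in full; the proofs are below) =====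
def Claim_equal_split_arr : Prop := ∀ (arr : List Int), Dom_split_arr arr → Spec_split_arr arr (split_arr arr)

-- ===== LEMMAS AND PROOFS =====

-- one iteration of A's inner loop over the three literal ranges, on a 3-bucket state
theorem split_arr_inner_step (x : Int) (i : Nat) (b0 b1 b2 : List Int) :
    ([(0,12),(13,80),(81,93)] : List (Int × Int)).zipIdx.foldl
      (fun newArr rj => if rj.1.1 ≤ (i:Int) ∧ (i:Int) ≤ rj.1.2 then newArr.modify rj.2 (fun b => b ++ [x]) else newArr)
      [b0,b1,b2]
    = [if (i:Int) ≤ 12 then b0 ++ [x] else b0,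
       if 13 ≤ (i:Int) ∧ (i:Int) ≤ 80 then b1 ++ [x] else b1,
       if 81 ≤ (i:Int) ∧ (i:Int) ≤ 93 then b2 ++ [x] else b2] := by
  simp only [List.zipIdx, List.foldl_cons, List.foldl_nil]
  norm_num
  split_ifs <;> simp_all [List.modify]

-- invariant: after processing indices 0..n-1 the three buckets are the capped takes
theorem split_arr_loop_inv (arr : List Int) (n : Nat) (hn : n ≤ arr.length) :
    (List.range n).foldl
      (fun newArr (i : Nat) =>
        ([(0, 12), (13, 80), (81, 93)] : List (Int × Int)).zipIdx.foldl
          (fun newArr rj =>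
            if rj.1.1 ≤ (i : Int) ∧ (i : Int) ≤ rj.1.2 then
              newArr.modify rj.2 (fun b => b ++ [arr.getD i 0])
            else newArr)
          newArr)
      [[], [], []]
    = [arr.take (min n 13),
       (arr.drop 13).take (min n 81 - 13),
       (arr.drop 81).take (min n 94 - 81)] := by
  induction n with
  | zero => simp
  | succ n ih =>
    have hn' : n ≤ arr.length := Nat.le_of_succ_le hn
    have hlt : n < arr.length := hn
    have hget : arr.getD n 0 = arr[n] := by
      simp [List.getD, List.getElem?_eq_getElem hlt]
    rw [List.range_succ, List.foldl_append, ih hn']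
    simp only [List.foldl_cons, List.foldl_nil]
    rw [split_arr_inner_step]
    congr 1
    · -- bucket 0
      by_cases h13 : n < 13
      · rw [if_pos (by omega : ((n:Int) ≤ 12)),
            show min (n+1) 13 = n + 1 by omega, show min n 13 = n by omega,
            List.take_add_one, List.getElem?_eq_getElem hlt, hget]
        simp
      · rw [if_neg (by omega : ¬ ((n:Int) ≤ 12)), show min (n+1) 13 = min n 13 by omega]
    congr 1
    · -- bucket 1
      by_cases hin : 13 ≤ n ∧ n ≤ 80
      · have hd : n - 13 < (arr.drop 13).length := by rw [List.length_drop]; omega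
        have hg : (arr.drop 13)[n - 13] = arr[n] := by
          rw [List.getElem_drop]; congr 1; omega
        rw [if_pos (by omega : (13 ≤ (n:Int) ∧ (n:Int) ≤ 80)),
            show min (n+1) 81 - 13 = (n - 13) + 1 by omega,
            show min n 81 - 13 = n - 13 by omega,
            List.take_add_one, List.getElem?_eq_getElem hd, hg, hget]
        simp
      · rw [if_neg (by omega : ¬ (13 ≤ (n:Int) ∧ (n:Int) ≤ 80)),
            show min (n+1) 81 - 13 = min n 81 - 13 by omega]
    congr 1
    · -- bucket 2
      by_cases hin : 81 ≤ n ∧ n ≤ 93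
      · have hd : n - 81 < (arr.drop 81).length := by rw [List.length_drop]; omega
        have hg : (arr.drop 81)[n - 81] = arr[n] := by
          rw [List.getElem_drop]; congr 1; omega
        rw [if_pos (by omega : (81 ≤ (n:Int) ∧ (n:Int) ≤ 93)),
            show min (n+1) 94 - 81 = (n - 81) + 1 by omega,
            show min n 94 - 81 = n - 81 by omega,
            List.take_add_one, List.getElem?_eq_getElem hd, hg, hget]
        simp
      · rw [if_neg (by omega : ¬ (81 ≤ (n:Int) ∧ (n:Int) ≤ 93)),
            show min (n+1) 94 - 81 = min n 94 - 81 by omega]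

-- ===== VERDICT (by name: the statement is the Claim_ definition above) =====
theorem split_arr_spec : Claim_equal_split_arr := by
  intro arr _
  unfold Spec_split_arr split_arr split_arr_alt
  rw [split_arr_loop_inv arr arr.length (le_refl _)]
  rw [show ((0:Int)) = ((0:Nat):Int) by simp,
      show ((13:Int)) = ((13:Nat):Int) by simp,
      show ((81:Int)) = ((81:Nat):Int) by simp,
      show ((94:Int)) = ((94:Nat):Int) by simp]
  rw [PySem.List.slice_natCast, PySem.List.slice_natCast, PySem.List.slice_natCast]
  simp only [List.drop_zero]
  have c1 : arr.take (min arr.length 13) = arr.take (13 - 0) := by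
    rw [List.take_eq_take_min (l := arr) (i := min arr.length 13),
        List.take_eq_take_min (l := arr) (i := 13 - 0)]
    congr 1; omega
  have c2 : (arr.drop 13).take (min arr.length 81 - 13) = (arr.drop 13).take (81 - 13) := by
    rw [List.take_eq_take_min (l := arr.drop 13) (i := min arr.length 81 - 13),
        List.take_eq_take_min (l := arr.drop 13) (i := 81 - 13)]
    rw [List.length_drop]; congr 1; omega
  have c3 : (arr.drop 81).take (min arr.length 94 - 81) = (arr.drop 81).take (94 - 81) := by
    rw [List.take_eq_take_min (l := arr.drop 81) (i := min arr.length 94 - 81),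
        List.take_eq_take_min (l := arr.drop 81) (i := 94 - 81)]
    rw [List.length_drop]; congr 1; omega
  rw [c1, c2, c3]
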